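-- pv_equiv track=rewrite | github.com/mdbytes/PythonResources | Playground/urinals.py | find_next_urinal
-- ===== SOURCE A (Python) =====
-- def find_next_urinal(urinals):
--     # Find the urinal with the maximum distance to the nearest occupied urinal
--     max_distance = -1
--     chosen_urinal = -1
--
--     for i in range(len(urinals)):
--         if urinals[i]:  # Skip if the urinal is occupied
--             continue
--
--         # Calculate the minimum distance to the nearest occupied urinal
--         distance = min(
--             (j - i) if urinals[j] and j > i else (i - j)
--             for j in range(len(urinals))
--             if urinals[j]
--         )
--
--         # Choose this urinal if the distance is the largest we've seen
--         if distance > max_distance: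
--             max_distance = distance
--             chosen_urinal = i
--
--     return chosen_urinal
-- ===== SOURCE B (Python) =====
-- def find_next_urinal(urinals):
--     # Two linear passes computing for each stall the distance to the nearest
--     # occupied stall on the left / on the right, then one argmax scan.
--     n = len(urinals)
--     big = n + 1  # larger than any real distance = "no occupied stall seen yet"
--     left = []
--     d = big
--     for x in urinals:
--         d = 0 if x else min(d + 1, big)
--         left.append(d)
--     right = []
--     d = big
--     for x in reversed(urinals):
--         d = 0 if x else min(d + 1, big)
--         right.append(d)
--     right.reverse()
--     best_d, best_i = -1, -1
--     for i in range(n):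
--         if not urinals[i]:
--             di = min(left[i], right[i])
--             if di > best_d:
--                 best_d, best_i = di, i
--     return best_i
-- ===== Notes on version B (the rewrite author's own statement) =====
-- stated objective: alternative
-- what changed: A recomputes the nearest-occupied distance for every empty stall with an inner scan over all stalls; B computes all nearest-occupied distances with one left-to-right and one right-to-left pass and then picks the argmax in a single scan.
import Mathlib
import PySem

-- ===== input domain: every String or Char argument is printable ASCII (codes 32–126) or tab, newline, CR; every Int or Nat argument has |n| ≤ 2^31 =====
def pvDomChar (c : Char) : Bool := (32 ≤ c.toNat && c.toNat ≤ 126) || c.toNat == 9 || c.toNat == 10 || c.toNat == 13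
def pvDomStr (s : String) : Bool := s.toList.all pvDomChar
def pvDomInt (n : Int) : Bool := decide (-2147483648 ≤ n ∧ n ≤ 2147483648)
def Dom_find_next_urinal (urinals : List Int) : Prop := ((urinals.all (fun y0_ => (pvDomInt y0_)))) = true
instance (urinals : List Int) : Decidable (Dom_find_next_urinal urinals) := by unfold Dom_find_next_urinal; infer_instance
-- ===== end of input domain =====

-- B replaces A's per-empty-stall scan over all stalls by two directional distance passes
-- plus one argmax scan (objective: alternative algorithm).


-- ===== PORT A =====
-- literal port of A: for each empty stall i, min over all occupied j of the
-- branch expression, kept in a running (max_distance, chosen_urinal) pair.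
def find_next_urinal (urinals : List Int) : Int :=
  (((List.range urinals.length).foldl (fun (st : Int × Int) i =>
    if urinals.getD i 0 ≠ 0 then st      -- continue: occupied
    else
      let cands := (((List.range urinals.length).filter
          (fun j => urinals.getD j 0 ≠ 0)).map
        (fun j => if urinals.getD j 0 ≠ 0 ∧ i < j then (j : Int) - (i : Int)
                  else (i : Int) - (j : Int)))
      match PySem.List.min? cands (fun x => x) with
      | none => st          -- Python raises ValueError here; excluded by Pre_
      | some d => if d > st.1 then (d, (i : Int)) else st)
    ((-1 : Int), (-1 : Int))).2)

-- ===== PORT B =====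
-- one directional pass of Source B: running distance to the last nonzero entry, capped at big
def pvScanB (big : Int) (xs : List Int) : List Int :=
  (xs.foldl (fun (acc : List Int × Int) x =>
    let d := if x ≠ 0 then 0 else min (acc.2 + 1) big
    (acc.1 ++ [d], d)) (([] : List Int), big)).1

def find_next_urinal_alt (urinals : List Int) : Int :=
  let big : Int := (urinals.length : Int) + 1
  let left := pvScanB big urinals
  let right := (pvScanB big urinals.reverse).reverse
  (((List.range urinals.length).foldl (fun (st : Int × Int) i =>
    if urinals.getD i 0 ≠ 0 then st
    else
      let di := min (left.getD i 0) (right.getD i 0)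
      if di > st.1 then (di, (i : Int)) else st)
    ((-1 : Int), (-1 : Int))).2)

-- ===== PRECONDITION & SPEC =====
-- Pre_ excludes exactly the inputs on which A raises ValueError (min() of an empty
-- generator): a nonempty list with no occupied stall.
def Pre_find_next_urinal (urinals : List Int) : Prop :=
  urinals = [] ∨ ∃ x ∈ urinals, x ≠ 0
instance (urinals : List Int) : Decidable (Pre_find_next_urinal urinals) := by
  unfold Pre_find_next_urinal; infer_instance

def pvWitness_find_next_urinal : List Int := [1, 0, 0, 0, 1]

def Spec_find_next_urinal (urinals : List Int) (out : Int) : Prop :=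
  out = find_next_urinal_alt urinals
instance (urinals : List Int) (out : Int) : Decidable (Spec_find_next_urinal urinals out) := by
  unfold Spec_find_next_urinal; infer_instance

-- ===== CLAIM (what is proved, stated in full; the proofs are below) =====
def Claim_equal_find_next_urinal : Prop := ∀ (urinals : List Int),
  Dom_find_next_urinal urinals → Pre_find_next_urinal urinals →
  Spec_find_next_urinal urinals (find_next_urinal urinals)

-- ===== LEMMAS AND PROOFS =====

-- recursive form of one pass of pvScanB
def pvScanFrom (big d : Int) (xs : List Int) : List Int :=
  match xs with
  | [] => []
  | x :: xs =>
    let d' := if x ≠ 0 then 0 else min (d + 1) big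
    d' :: pvScanFrom big d' xs

theorem pvScanB_foldl (big : Int) (xs : List Int) (acc : List Int) (d : Int) :
    (xs.foldl (fun (acc : List Int × Int) x =>
      let d := if x ≠ 0 then 0 else min (acc.2 + 1) big
      (acc.1 ++ [d], d)) (acc, d)).1 = acc ++ pvScanFrom big d xs := by
  induction xs generalizing acc d with
  | nil => simp [pvScanFrom]
  | cons x xs ih =>
    simp only [List.foldl_cons, pvScanFrom]
    rw [ih]
    simp

theorem pvScanB_eq (big : Int) (xs : List Int) :
    pvScanB big xs = pvScanFrom big big xs := by
  unfold pvScanB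
  rw [pvScanB_foldl]
  simp

-- characterization of a directional pass: the i-th output is the minimum of
-- (seed + 1 + i, capped at big) and the distances i - j to nonzero entries j ≤ i
theorem pvScanFrom_char (big : Int) (hbig : 0 ≤ big) :
    ∀ (xs : List Int) (d : Int), 0 ≤ d → ∀ (i : ℕ), i < xs.length →
    ((pvScanFrom big d xs).getD i 0 ≤ min (d + 1 + (i : Int)) big ∧
     (∀ j : ℕ, j ≤ i → xs.getD j 0 ≠ 0 → (pvScanFrom big d xs).getD i 0 ≤ (i : Int) - (j : Int)) ∧
     ((pvScanFrom big d xs).getD i 0 = min (d + 1 + (i : Int)) big ∨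
      ∃ j : ℕ, j ≤ i ∧ xs.getD j 0 ≠ 0 ∧ (pvScanFrom big d xs).getD i 0 = (i : Int) - (j : Int))) := by
  intro xs
  induction xs with
  | nil => intro d hd i hi; simp at hi
  | cons x xs ih =>
    intro d hd i hi
    rcases i with _ | k
    case zero =>
      have hget0 : (pvScanFrom big d (x :: xs)).getD 0 0
          = (if x ≠ 0 then 0 else min (d + 1) big) := by
        simp [pvScanFrom]
      by_cases hx : x ≠ 0
      · refine ⟨?_, ?_, ?_⟩
        · rw [hget0, if_pos hx]; omega
        · intro j hj _
          interval_cases j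
          rw [hget0, if_pos hx]
          omega
        · right
          refine ⟨0, le_refl _, by simpa using hx, ?_⟩
          rw [hget0, if_pos hx]
          omega
      · refine ⟨?_, ?_, ?_⟩
        · rw [hget0, if_neg hx]; omega
        · intro j hj hocc; interval_cases j; simp at hocc; simp [hocc] at hx
        · left; rw [hget0, if_neg hx]; omega
    case succ =>
      have hk : k < xs.length := by simpa using Nat.lt_of_succ_lt_succ hi
      have hd' : (0 : Int) ≤ if x ≠ 0 then 0 else min (d + 1) big := by
        by_cases hx : x ≠ 0 <;> simp [hx] <;> omega
      obtain ⟨ha, hb, hc⟩ := ih (if x ≠ 0 then 0 else min (d + 1) big) hd' k hk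
      have hget : (pvScanFrom big d (x :: xs)).getD (k + 1) 0
          = (pvScanFrom big (if x ≠ 0 then 0 else min (d + 1) big) xs).getD k 0 := by
        simp [pvScanFrom]
      by_cases hx : x ≠ 0
      · rw [if_pos hx] at ha hb hc
        refine ⟨?_, ?_, ?_⟩
        · rw [hget, if_pos hx]
          clear ih hb hc hget hd' hi hk
          push_cast
          omega
        · intro j hj hocc
          rw [hget, if_pos hx]
          rcases j with _ | m
          · clear ih hb hc hget hd' hi hk
            push_cast
            omega
          · have h5 := hb m (Nat.le_of_succ_le_succ hj) (by simpa using hocc)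
            clear ih hb hc hget hd' hi hk
            push_cast at h5 ⊢
            omega
        · rw [hget, if_pos hx]
          rcases hc with hc | ⟨j, hj1, hj2, hj3⟩
          · by_cases hcase : ((k : Int) + 1) ≤ big
            · right
              refine ⟨0, Nat.zero_le _, by simpa using hx, ?_⟩
              clear ih hb ha hget hd' hi hk
              push_cast
              omega
            · left
              clear ih hb ha hget hd' hi hk
              push_cast
              omega
          · right
            refine ⟨j + 1, Nat.succ_le_succ hj1, by simpa using hj2, ?_⟩
            clear ih hb ha hget hd' hi hk hj2
            push_cast at hj3 ⊢
            omega
      · rw [if_neg hx] at ha hb hc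
        refine ⟨?_, ?_, ?_⟩
        · rw [hget, if_neg hx]
          clear ih hb hc hget hd' hi hk
          push_cast at ha ⊢
          omega
        · intro j hj hocc
          rw [hget, if_neg hx]
          rcases j with _ | m
          · simp at hocc; simp [hocc] at hx
          · have h5 := hb m (Nat.le_of_succ_le_succ hj) (by simpa using hocc)
            clear ih hb hc hget hd' hi hk
            push_cast at h5 ⊢
            omega
        · rw [hget, if_neg hx]
          rcases hc with hc | ⟨j, hj1, hj2, hj3⟩
          · left
            clear ih hb ha hget hd' hi hk
            push_cast
            omega
          · right
            refine ⟨j + 1, Nat.succ_le_succ hj1, by simpa using hj2, ?_⟩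
            clear ih hb ha hget hd' hi hk hj2
            push_cast at hj3 ⊢
            omega

theorem pvLeft_char (urinals : List Int) (i : ℕ) (hi : i < urinals.length) :
    (pvScanB ((urinals.length : Int) + 1) urinals).getD i 0 ≤ (urinals.length : Int) + 1 ∧
    (∀ j : ℕ, j ≤ i → urinals.getD j 0 ≠ 0 →
      (pvScanB ((urinals.length : Int) + 1) urinals).getD i 0 ≤ (i : Int) - (j : Int)) ∧
    ((pvScanB ((urinals.length : Int) + 1) urinals).getD i 0 = (urinals.length : Int) + 1 ∨
      ∃ j : ℕ, j ≤ i ∧ urinals.getD j 0 ≠ 0 ∧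
        (pvScanB ((urinals.length : Int) + 1) urinals).getD i 0 = (i : Int) - (j : Int)) := by
  rw [pvScanB_eq]
  have hbig : (0 : Int) ≤ (urinals.length : Int) + 1 := by positivity
  obtain ⟨ha, hb, hc⟩ := pvScanFrom_char _ hbig urinals _ hbig i hi
  refine ⟨le_trans ha (min_le_right _ _), hb, ?_⟩
  rcases hc with hc | hc
  · left
    have hmm : min ((urinals.length : Int) + 1 + 1 + (i : Int)) ((urinals.length : Int) + 1)
        = (urinals.length : Int) + 1 := by
      clear hc hb
      omega
    rw [hc, hmm]
  · right; exact hc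

theorem pvScanFrom_length (big d : Int) (xs : List Int) :
    (pvScanFrom big d xs).length = xs.length := by
  induction xs generalizing d with
  | nil => simp [pvScanFrom]
  | cons x xs ih => simp [pvScanFrom, ih]

theorem pvRight_char (urinals : List Int) (i : ℕ) (hi : i < urinals.length) :
    ((pvScanB ((urinals.length : Int) + 1) urinals.reverse).reverse.getD i 0 ≤ (urinals.length : Int) + 1) ∧
    (∀ j : ℕ, i ≤ j → j < urinals.length → urinals.getD j 0 ≠ 0 →
      (pvScanB ((urinals.length : Int) + 1) urinals.reverse).reverse.getD i 0 ≤ (j : Int) - (i : Int)) ∧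
    ((pvScanB ((urinals.length : Int) + 1) urinals.reverse).reverse.getD i 0 = (urinals.length : Int) + 1 ∨
      ∃ j : ℕ, i ≤ j ∧ j < urinals.length ∧ urinals.getD j 0 ≠ 0 ∧
        (pvScanB ((urinals.length : Int) + 1) urinals.reverse).reverse.getD i 0 = (j : Int) - (i : Int)) := by
  have hlenrev : urinals.reverse.length = urinals.length := by simp
  have hlen : (pvScanB ((urinals.length : Int) + 1) urinals.reverse).length = urinals.length := by
    rw [pvScanB_eq, pvScanFrom_length, hlenrev]
  have hi'lt : urinals.length - 1 - i < urinals.reverse.length := by rw [hlenrev]; omega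
  have hgetrev : (pvScanB ((urinals.length : Int) + 1) urinals.reverse).reverse.getD i 0
      = (pvScanB ((urinals.length : Int) + 1) urinals.reverse).getD (urinals.length - 1 - i) 0 := by
    rw [List.getD_eq_getElem?_getD, List.getD_eq_getElem?_getD,
        List.getElem?_reverse (by rw [hlen]; exact hi)]
    congr 2
    rw [hlen]
  have hrevget : ∀ j : ℕ, j < urinals.length →
      urinals.reverse.getD j 0 = urinals.getD (urinals.length - 1 - j) 0 := by
    intro j hj
    rw [List.getD_eq_getElem?_getD, List.getD_eq_getElem?_getD, List.getElem?_reverse hj]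
  obtain ⟨ha, hb, hc⟩ := pvLeft_char urinals.reverse (urinals.length - 1 - i) hi'lt
  rw [show ((urinals.reverse.length : Int) + 1) = ((urinals.length : Int) + 1) by rw [hlenrev]]
    at ha hb hc
  refine ⟨?_, ?_, ?_⟩
  · rw [hgetrev]; exact ha
  · intro j hij hj hocc
    have hlt1 : urinals.length - 1 - j < urinals.length := by clear hb hc; omega
    have hle1 : urinals.length - 1 - j ≤ urinals.length - 1 - i := by clear hb hc; omega
    have hjj : urinals.length - 1 - (urinals.length - 1 - j) = j := by clear hb hc; omega
    have hocc' : urinals.reverse.getD (urinals.length - 1 - j) 0 ≠ 0 := by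
      rw [hrevget _ hlt1, hjj]; exact hocc
    have h6 := hb (urinals.length - 1 - j) hle1 hocc'
    rw [hgetrev]
    refine le_trans h6 (le_of_eq ?_)
    clear hc hb h6
    push_cast
    omega
  · rcases hc with hc | ⟨j', hj'1, hj'2, hj'3⟩
    · left; rw [hgetrev]; exact hc
    · right
      have hj'lt : j' < urinals.length := by omega
      refine ⟨urinals.length - 1 - j', by omega, by omega, ?_, ?_⟩
      · rw [← hrevget _ hj'lt]; exact hj'2
      · rw [hgetrev, hj'3]
        clear hb hj'2
        push_cast
        omega


-- the candidate-distance function used by both programs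
def pvF (i j : ℕ) : Int := if i < j then (j : Int) - (i : Int) else (i : Int) - (j : Int)

theorem pvF_le (i j : ℕ) (h : j ≤ i) : pvF i j = (i : Int) - (j : Int) := by
  unfold pvF
  rw [if_neg (Nat.not_lt.mpr h)]

theorem pvF_ge (i j : ℕ) (h : i ≤ j) : pvF i j = (j : Int) - (i : Int) := by
  unfold pvF
  by_cases hij : i < j
  · rw [if_pos hij]
  · have : j = i := Nat.le_antisymm (Nat.not_lt.mp hij) h
    subst this
    rw [if_neg hij]

theorem pvF_lt (n i j : ℕ) (hi : i < n) (hj : j < n) : pvF i j < (n : Int) + 1 := by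
  unfold pvF
  by_cases hij : i < j <;> simp [hij] <;> omega

theorem mem_cands (urinals : List Int) (i : ℕ) (x : Int) :
    x ∈ (((List.range urinals.length).filter (fun j => urinals.getD j 0 ≠ 0)).map
      (fun j => if urinals.getD j 0 ≠ 0 ∧ i < j then (j : Int) - (i : Int)
                else (i : Int) - (j : Int)))
    ↔ ∃ j : ℕ, j < urinals.length ∧ urinals.getD j 0 ≠ 0 ∧ x = pvF i j := by
  simp only [List.mem_map, List.mem_filter, List.mem_range, decide_eq_true_eq]
  constructor
  · rintro ⟨j, ⟨hj, hjo⟩, rfl⟩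
    refine ⟨j, hj, hjo, ?_⟩
    by_cases hij : i < j
    · rw [if_pos ⟨hjo, hij⟩, pvF_ge i j (Nat.le_of_lt hij)]
    · rw [if_neg (fun h => hij h.2), pvF_le i j (Nat.not_lt.mp hij)]
  · rintro ⟨j, hj, hjo, rfl⟩
    refine ⟨j, ⟨hj, hjo⟩, ?_⟩
    by_cases hij : i < j
    · rw [if_pos ⟨hjo, hij⟩, pvF_ge i j (Nat.le_of_lt hij)]
    · rw [if_neg (fun h => hij h.2), pvF_le i j (Nat.not_lt.mp hij)]

-- under Pre_, for an empty stall i the min of A's candidate list equals B's min(left, right)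
theorem key_dist (urinals : List Int) (i : ℕ) (hi : i < urinals.length)
    (hocc : ∃ j0 : ℕ, j0 < urinals.length ∧ urinals.getD j0 0 ≠ 0) :
    PySem.List.min? ((((List.range urinals.length).filter
        (fun j => urinals.getD j 0 ≠ 0)).map
      (fun j => if urinals.getD j 0 ≠ 0 ∧ i < j then (j : Int) - (i : Int)
                else (i : Int) - (j : Int)))) (fun x => x)
    = some (min ((pvScanB ((urinals.length : Int) + 1) urinals).getD i 0)
        ((pvScanB ((urinals.length : Int) + 1) urinals.reverse).reverse.getD i 0)) := by
  obtain ⟨j0, hj0, hj0occ⟩ := hocc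
  obtain ⟨hLa, hLb, hLc⟩ := pvLeft_char urinals i hi
  obtain ⟨hRa, hRb, hRc⟩ := pvRight_char urinals i hi
  have hmin_le : ∀ j : ℕ, j < urinals.length → urinals.getD j 0 ≠ 0 →
      min ((pvScanB ((urinals.length : Int) + 1) urinals).getD i 0)
        ((pvScanB ((urinals.length : Int) + 1) urinals.reverse).reverse.getD i 0) ≤ pvF i j := by
    intro j hj hjo
    by_cases hij : i ≤ j
    · rw [pvF_ge i j hij]
      exact le_trans (min_le_right _ _) (hRb j hij hj hjo)
    · rw [pvF_le i j (Nat.le_of_lt (Nat.not_le.mp hij))]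
      exact le_trans (min_le_left _ _) (hLb j (Nat.le_of_lt (Nat.not_le.mp hij)) hjo)
  have hlt : min ((pvScanB ((urinals.length : Int) + 1) urinals).getD i 0)
      ((pvScanB ((urinals.length : Int) + 1) urinals.reverse).reverse.getD i 0)
      < (urinals.length : Int) + 1 :=
    lt_of_le_of_lt (hmin_le j0 hj0 hj0occ) (pvF_lt urinals.length i j0 hi hj0)
  have hmem : ∃ j : ℕ, j < urinals.length ∧ urinals.getD j 0 ≠ 0 ∧
      min ((pvScanB ((urinals.length : Int) + 1) urinals).getD i 0)
        ((pvScanB ((urinals.length : Int) + 1) urinals.reverse).reverse.getD i 0) = pvF i j := by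
    rcases le_total ((pvScanB ((urinals.length : Int) + 1) urinals).getD i 0)
        ((pvScanB ((urinals.length : Int) + 1) urinals.reverse).reverse.getD i 0) with hLR | hLR
    · rw [min_eq_left hLR] at hlt ⊢
      rcases hLc with hc | ⟨j, hj1, hj2, hj3⟩
      · exact absurd hc (by clear hRc hLb hRb; omega)
      · exact ⟨j, lt_of_le_of_lt hj1 hi, hj2, by rw [hj3, pvF_le i j hj1]⟩
    · rw [min_eq_right hLR] at hlt ⊢
      rcases hRc with hc | ⟨j, hj1, hj2, hj3, hj4⟩
      · exact absurd hc (by clear hLc hLb hRb; omega)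
      · exact ⟨j, hj2, hj3, by rw [hj4, pvF_ge i j hj1]⟩
  obtain ⟨m, hm⟩ : ∃ m, PySem.List.min? ((((List.range urinals.length).filter
        (fun j => urinals.getD j 0 ≠ 0)).map
      (fun j => if urinals.getD j 0 ≠ 0 ∧ i < j then (j : Int) - (i : Int)
                else (i : Int) - (j : Int)))) (fun x => x) = some m := by
    rcases h : PySem.List.min? _ (fun x => x) with _ | m
    · exfalso
      have hnil := (PySem.List.min?_eq_none_iff _ _).mp h
      have hmm := (mem_cands urinals i (pvF i j0)).mpr ⟨j0, hj0, hj0occ, rfl⟩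
      rw [hnil] at hmm
      simp at hmm
    · exact ⟨m, rfl⟩
  rw [hm]
  congr 1
  obtain ⟨j1, hj1, hj1o, hj1e⟩ := (mem_cands urinals i m).mp (PySem.List.min?_mem hm)
  obtain ⟨j2, hj2, hj2o, hj2e⟩ := hmem
  exact le_antisymm
    (hj2e ▸ PySem.List.min?_isMin hm _ ((mem_cands urinals i (pvF i j2)).mpr ⟨j2, hj2, hj2o, rfl⟩))
    (hj1e ▸ hmin_le j1 hj1 hj1o)

theorem find_next_urinal_spec : Claim_equal_find_next_urinal := by
  intro urinals _ hpre
  unfold Spec_find_next_urinal find_next_urinal find_next_urinal_alt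
  rcases hpre with rfl | ⟨x, hx, hxne⟩
  · simp
  · obtain ⟨j0, hj0lt, hj0⟩ : ∃ j0 : ℕ, j0 < urinals.length ∧ urinals.getD j0 0 ≠ 0 := by
      obtain ⟨k, hk, hkx⟩ := List.mem_iff_getElem.1 hx
      exact ⟨k, hk, by rw [List.getD_eq_getElem?_getD, List.getElem?_eq_getElem hk]; simpa [hkx]⟩
    congr 1
    apply PySem.List.foldl_congr_mem
    intro st i hi
    have hilt : i < urinals.length := List.mem_range.1 hi
    by_cases hoc : urinals.getD i 0 ≠ 0
    · rw [if_pos hoc, if_pos hoc]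
    · rw [if_neg hoc, if_neg hoc]
      dsimp only
      rw [key_dist urinals i hilt ⟨j0, hj0lt, hj0⟩]
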